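-- pv_equiv track=rewrite | github.com/Jeremylaby/ASD_2023 | Python/Kruskal.py | convert_to_edges
-- ===== SOURCE A (Python) =====
-- def convert_to_edges(G):
--     edges=[]
--     edges2=[]
--     for i in range(len(G)):
--         for j in range(len(G[i])):
--             edges.append((i,G[i][j][0],G[i][j][1]))
--             if i<G[i][j][0]:
--                 edges2.append((i,G[i][j][0],G[i][j][1]))
--     return edges,edges2
-- ===== SOURCE B (Python) =====
-- def convert_to_edges(G):
--     def do_row(i, row, tail1, tail2):
--         if not row:
--             return tail1, tail2
--         t, w = row[0]
--         rest1, rest2 = do_row(i, row[1:], tail1, tail2)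
--         return [(i, t, w)] + rest1, ([(i, t, w)] + rest2 if i < t else rest2)
--
--     def do_rows(i, rows):
--         if not rows:
--             return [], []
--         tail1, tail2 = do_rows(i + 1, rows[1:])
--         return do_row(i, rows[0], tail1, tail2)
--
--     return do_rows(0, G)
-- ===== Notes on version B (the rewrite author's own statement) =====
-- stated objective: alternative
-- what changed: A's iterative double for-loop appending to two shared accumulators is replaced by a pair of mutually recursing functions over the list structure that build both result lists back-to-front by prepending each edge onto the results of the recursive call (no indices, no append-to-accumulator).
import Mathlib
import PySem

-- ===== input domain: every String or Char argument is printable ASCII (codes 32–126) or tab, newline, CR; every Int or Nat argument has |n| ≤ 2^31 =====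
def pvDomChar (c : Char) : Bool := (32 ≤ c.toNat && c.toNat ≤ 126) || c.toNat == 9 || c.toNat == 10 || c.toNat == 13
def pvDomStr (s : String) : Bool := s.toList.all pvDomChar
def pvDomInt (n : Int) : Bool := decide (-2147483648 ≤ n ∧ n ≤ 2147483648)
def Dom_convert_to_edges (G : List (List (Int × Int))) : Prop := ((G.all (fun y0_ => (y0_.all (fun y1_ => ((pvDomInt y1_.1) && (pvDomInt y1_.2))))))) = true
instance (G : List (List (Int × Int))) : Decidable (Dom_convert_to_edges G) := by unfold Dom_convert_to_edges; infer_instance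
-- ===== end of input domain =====

-- ===== PORT A =====
-- header: B replaces A's iterative index-driven double loop (appending to two accumulators)
-- by structural recursion building both lists back-to-front; an alternative of the same cost.
def convert_to_edges (G : List (List (Int × Int))) : (List (Int × Int × Int)) × (List (Int × Int × Int)) :=
  let st :=
    (PySem.List.pyRange 0 (PySem.List.len G) 1).foldl
      (fun (st : List (Int × Int × Int) × List (Int × Int × Int)) i =>
        (PySem.List.pyRange 0 (PySem.List.len (PySem.List.pyGetD G i [])) 1).foldl
          (fun st2 j =>
            (st2.1 ++ [(i, (PySem.List.pyGetD (PySem.List.pyGetD G i []) j (0, 0)).1,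
                           (PySem.List.pyGetD (PySem.List.pyGetD G i []) j (0, 0)).2)],
             if i < (PySem.List.pyGetD (PySem.List.pyGetD G i []) j (0, 0)).1 then
               st2.2 ++ [(i, (PySem.List.pyGetD (PySem.List.pyGetD G i []) j (0, 0)).1,
                             (PySem.List.pyGetD (PySem.List.pyGetD G i []) j (0, 0)).2)]
             else st2.2))
          st)
      ([], [])
  (st.1, st.2)

-- ===== PORT B =====
def cteDoRow (i : Int) (row : List (Int × Int)) (tail1 tail2 : List (Int × Int × Int)) :
    (List (Int × Int × Int)) × (List (Int × Int × Int)) :=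
  match row with
  | [] => (tail1, tail2)
  | (t, w) :: rest =>
    let p := cteDoRow i rest tail1 tail2
    ((i, t, w) :: p.1, if i < t then (i, t, w) :: p.2 else p.2)

def cteDoRows (i : Int) (rows : List (List (Int × Int))) :
    (List (Int × Int × Int)) × (List (Int × Int × Int)) :=
  match rows with
  | [] => ([], [])
  | r :: rest =>
    let p := cteDoRows (i + 1) rest
    cteDoRow i r p.1 p.2

def convert_to_edges_alt (G : List (List (Int × Int))) : (List (Int × Int × Int)) × (List (Int × Int × Int)) :=
  cteDoRows 0 G

-- ===== PRECONDITION & SPEC =====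
def Spec_convert_to_edges (G : List (List (Int × Int))) (out : (List (Int × Int × Int)) × (List (Int × Int × Int))) : Prop := out = convert_to_edges_alt G
instance (G : List (List (Int × Int))) (out : (List (Int × Int × Int)) × (List (Int × Int × Int))) : Decidable (Spec_convert_to_edges G out) := by unfold Spec_convert_to_edges; infer_instance

-- ===== CLAIM =====
def Claim_equal_convert_to_edges : Prop := ∀ (G : List (List (Int × Int))), Dom_convert_to_edges G → Spec_convert_to_edges G (convert_to_edges G)

-- ===== LEMMAS AND PROOFS =====
lemma cte_inner (i : Int) (row : List (Int × Int)) (a : List (Int × Int × Int)) :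
    row.foldl
      (fun st2 e =>
        (st2.1 ++ [(i, e.1, e.2)],
         if i < e.1 then st2.2 ++ [(i, e.1, e.2)] else st2.2))
      (a, a.filter (fun e => decide (e.1 < e.2.1)))
    = (a ++ row.map (fun e => (i, e.1, e.2)),
       (a ++ row.map (fun e => (i, e.1, e.2))).filter (fun e => decide (e.1 < e.2.1))) := by
  induction row generalizing a with
  | nil => simp
  | cons e rest ih =>
    have hstep :
        ((a ++ [(i, e.1, e.2)]).filter (fun x => decide (x.1 < x.2.1)))
          = (if i < e.1 then a.filter (fun x => decide (x.1 < x.2.1)) ++ [(i, e.1, e.2)]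
             else a.filter (fun x => decide (x.1 < x.2.1))) := by
      by_cases h : i < e.1 <;> simp [List.filter_append, h]
    simp only [List.foldl_cons, List.map_cons]
    rw [show (a ++ (i, e.1, e.2) :: rest.map (fun e => (i, e.1, e.2)))
          = (a ++ [(i, e.1, e.2)]) ++ rest.map (fun e => (i, e.1, e.2)) by simp]
    rw [← ih (a ++ [(i, e.1, e.2)])]
    rw [hstep]

lemma cte_inner' (i : Int) (row : List (Int × Int)) (a : List (Int × Int × Int)) :
    (PySem.List.pyRange 0 (PySem.List.len row) 1).foldl
      (fun st2 j =>
        (st2.1 ++ [(i, (PySem.List.pyGetD row j ((0:Int), (0:Int))).1,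
                       (PySem.List.pyGetD row j ((0:Int), (0:Int))).2)],
         if i < (PySem.List.pyGetD row j ((0:Int), (0:Int))).1 then
           st2.2 ++ [(i, (PySem.List.pyGetD row j ((0:Int), (0:Int))).1,
                         (PySem.List.pyGetD row j ((0:Int), (0:Int))).2)]
         else st2.2))
      (a, a.filter (fun e => decide (e.1 < e.2.1)))
    = (a ++ row.map (fun e => (i, e.1, e.2)),
       (a ++ row.map (fun e => (i, e.1, e.2))).filter (fun e => decide (e.1 < e.2.1))) := by
  rw [PySem.List.foldl_pyRange_zero_pyGetD row ((0:Int), (0:Int))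
      (fun st2 e =>
        ((st2 : List (Int × Int × Int) × List (Int × Int × Int)).1 ++ [(i, e.1, e.2)],
         if i < e.1 then st2.2 ++ [(i, e.1, e.2)] else st2.2))]
  exact cte_inner i row a

lemma cte_outer (l : List (Int × List (Int × Int))) (a : List (Int × Int × Int)) :
    l.foldl
      (fun st p =>
        (PySem.List.pyRange 0 (PySem.List.len p.2) 1).foldl
          (fun st2 j =>
            (st2.1 ++ [(p.1, (PySem.List.pyGetD p.2 j ((0:Int), (0:Int))).1,
                             (PySem.List.pyGetD p.2 j ((0:Int), (0:Int))).2)],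
             if p.1 < (PySem.List.pyGetD p.2 j ((0:Int), (0:Int))).1 then
               st2.2 ++ [(p.1, (PySem.List.pyGetD p.2 j ((0:Int), (0:Int))).1,
                               (PySem.List.pyGetD p.2 j ((0:Int), (0:Int))).2)]
             else st2.2))
          st)
      (a, a.filter (fun e => decide (e.1 < e.2.1)))
    = (a ++ l.flatMap (fun p => p.2.map (fun t => (p.1, t.1, t.2))),
       (a ++ l.flatMap (fun p => p.2.map (fun t => (p.1, t.1, t.2)))).filter
         (fun e => decide (e.1 < e.2.1))) := by
  induction l generalizing a with
  | nil => simp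
  | cons p rest ih =>
    simp only [List.foldl_cons, List.flatMap_cons]
    rw [cte_inner' p.1 p.2 a, ih (a ++ p.2.map (fun t => (p.1, t.1, t.2)))]
    simp

lemma cteDoRow_eq (i : Int) (row : List (Int × Int)) (t1 t2 : List (Int × Int × Int)) :
    cteDoRow i row t1 t2
      = (row.map (fun e => (i, e.1, e.2)) ++ t1,
         (row.map (fun e => (i, e.1, e.2))).filter (fun e => decide (e.1 < e.2.1)) ++ t2) := by
  induction row with
  | nil => simp [cteDoRow]
  | cons e rest ih =>
    by_cases h : i < e.1 <;> simp [cteDoRow, ih, h]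

lemma cteDoRows_eq (rows : List (List (Int × Int))) (i : Int) :
    cteDoRows i rows
      = ((PySem.List.enumerate rows i).flatMap (fun p => p.2.map (fun t => (p.1, t.1, t.2))),
         ((PySem.List.enumerate rows i).flatMap
            (fun p => p.2.map (fun t => (p.1, t.1, t.2)))).filter
           (fun e => decide (e.1 < e.2.1))) := by
  induction rows generalizing i with
  | nil => simp [cteDoRows, PySem.List.enumerate]
  | cons r rest ih =>
    simp only [cteDoRows, ih (i + 1), cteDoRow_eq, PySem.List.enumerate_cons,
      List.flatMap_cons, List.filter_append]

-- ===== VERDICT =====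
theorem convert_to_edges_spec : Claim_equal_convert_to_edges := by
  intro G _
  show convert_to_edges G = convert_to_edges_alt G
  unfold convert_to_edges convert_to_edges_alt
  rw [cteDoRows_eq G 0,
    PySem.List.enumerate_eq_map_pyRange G ([] : List (Int × Int))]
  have h := cte_outer ((PySem.List.pyRange 0 (PySem.List.len G) 1).map
      (fun j => (j, PySem.List.pyGetD G j ([] : List (Int × Int))))) []
  rw [List.foldl_map] at h
  simp only [List.nil_append, List.filter_nil] at h
  rw [h]
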